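-- pv_equiv track=rewrite | github.com/koushikvps/BIAutomation-pipeline | agents/shared/story_interpreter.py | interpret_gherkin
-- ===== SOURCE A (Python) =====
-- def interpret_gherkin(text: str) -> dict:
--     """Parse Gherkin format into structured components before LLM call."""
--     components = {"given": [], "when": [], "then": [], "and": [], "but": []}
--     current_section = None
--     for line in text.split("\n"):
--         line = line.strip()
--         lower = line.lower()
--         for keyword in ["given", "when", "then", "and", "but"]:
--             if lower.startswith(keyword + " "):
--                 current_section = keyword
--                 components[keyword].append(line[len(keyword)+1:].strip())
--                 break
--     return components
-- ===== SOURCE B (Python) =====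
-- def interpret_gherkin(text: str) -> dict:
--     """Parse Gherkin format into structured components before LLM call."""
--     # Keyword-major: one pass over the lines per keyword.  Correct because the
--     # five keywords start with distinct letters, so no line matches two of them.
--     lines = [line.strip() for line in text.split("\n")]
--     return {kw: [line[len(kw) + 1:].strip()
--                  for line in lines
--                  if line.lower().startswith(kw + " ")]
--             for kw in ("given", "when", "then", "and", "but")}
-- ===== Notes on version B (the rewrite author's own statement) =====
-- stated objective: alternative
-- what changed: Inverted the loop nesting: instead of A's line-major pass that tries the five keywords with break per line and mutates an accumulator dict, B is keyword-major - a dict comprehension building each keyword's list by its own filtering pass over the pre-stripped lines, correct because no line can match two keywords (distinct first letters).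
import Mathlib
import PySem

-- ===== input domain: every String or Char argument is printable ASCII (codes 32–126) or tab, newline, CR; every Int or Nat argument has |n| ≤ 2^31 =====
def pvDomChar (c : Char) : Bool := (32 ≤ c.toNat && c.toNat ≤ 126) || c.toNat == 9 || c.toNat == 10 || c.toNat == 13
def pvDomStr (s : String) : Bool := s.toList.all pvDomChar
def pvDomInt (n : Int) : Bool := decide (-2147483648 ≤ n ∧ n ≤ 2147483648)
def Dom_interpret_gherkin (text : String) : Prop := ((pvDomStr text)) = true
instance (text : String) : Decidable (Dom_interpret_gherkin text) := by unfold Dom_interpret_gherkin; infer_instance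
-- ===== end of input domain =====

-- B inverts A's loop nesting: instead of a line-major pass trying each keyword with break,
-- B is keyword-major, building each keyword's list by its own filtering pass over the lines
-- (correct since no line matches two keywords); same cost, alternative decomposition.

-- ===== PORT A =====

-- the dict literal {"given": [], "when": [], "then": [], "and": [], "but": []}
def pvComponents0 : PySem.Dict String (List String) :=
  PySem.Dict.mk [("given", []), ("when", []), ("then", []), ("and", []), ("but", [])]

-- the inner 'for keyword in [...]' loop with its break: first matching keyword updates, then stop
def pvTryA (d : PySem.Dict String (List String)) (line lower : List Char) :
    List String → PySem.Dict String (List String)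
  | [] => d
  | kw :: rest =>
    if PySem.Chars.startswith lower (kw.toList ++ [' ']) then
      -- components[keyword].append(line[len(keyword)+1:].strip())
      d.modify kw [] (fun ls =>
        ls ++ [String.ofList (PySem.Chars.strip
                (PySem.List.slice line (some ((kw.toList.length : Int) + 1)) none))])
    else pvTryA d line lower rest

-- one iteration of the outer loop (current_section is written but never read: not ported as state)
def pvStepA (d : PySem.Dict String (List String)) (raw : List Char) :
    PySem.Dict String (List String) :=
  let line := PySem.Chars.strip raw
  let lower := PySem.Chars.lower line
  pvTryA d line lower ["given", "when", "then", "and", "but"]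

def interpret_gherkin (text : String) : List (String × List String) :=
  ((PySem.Chars.splitOn text.toList "\n".toList).foldl pvStepA pvComponents0).items

-- ===== PORT B =====

-- B's inner list comprehension for one keyword: filter the pre-stripped lines by
-- line.lower().startswith(kw + " "), then map line[len(kw)+1:].strip()
def pvMatchesB (kw : String) (lines : List (List Char)) : List String :=
  (lines.filter (fun line =>
      PySem.Chars.startswith (PySem.Chars.lower line) (kw.toList ++ [' ']))).map
    (fun line => String.ofList (PySem.Chars.strip
        (PySem.List.slice line (some ((kw.toList.length : Int) + 1)) none)))

def interpret_gherkin_alt (text : String) : List (String × List String) :=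
  let lines := (PySem.Chars.splitOn text.toList "\n".toList).map PySem.Chars.strip
  ["given", "when", "then", "and", "but"].map (fun kw => (kw, pvMatchesB kw lines))

-- ===== PRECONDITION & SPEC =====
def Spec_interpret_gherkin (text : String) (out : List (String × List String)) : Prop := out = interpret_gherkin_alt text
instance (text : String) (out : List (String × List String)) : Decidable (Spec_interpret_gherkin text out) := by unfold Spec_interpret_gherkin; infer_instance

-- ===== CLAIM (what is proved, stated in full; the proofs are below) =====
def Claim_equal_interpret_gherkin : Prop := ∀ (text : String), Dom_interpret_gherkin text → Spec_interpret_gherkin text (interpret_gherkin text)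

-- ===== LEMMAS AND PROOFS =====

-- A's running dict, with the five keyword slots as explicit accumulators
def pvDictOf (g w t a b : List String) : PySem.Dict String (List String) :=
  PySem.Dict.mk [("given", g), ("when", w), ("then", t), ("and", a), ("but", b)]

-- the contribution of one (already stripped) line to keyword kw: [] or a singleton
def pvM (kw : String) (line : List Char) : List String :=
  if PySem.Chars.startswith (PySem.Chars.lower line) (kw.toList ++ [' ']) then
    [String.ofList (PySem.Chars.strip
        (PySem.List.slice line (some ((kw.toList.length : Int) + 1)) none))]
  else []

-- two mutually non-prefix patterns cannot both match: A's break never hides a second match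
theorem pvDisj (l p q : List Char) (h1 : ¬ p <+: q) (h2 : ¬ q <+: p)
    (hp : PySem.Chars.startswith l p = true) : PySem.Chars.startswith l q = false := by
  rw [← Bool.not_eq_true, PySem.Chars.startswith_iff]
  rw [PySem.Chars.startswith_iff] at hp
  intro hq
  rcases List.prefix_or_prefix_of_prefix hp hq with h | h
  · exact h1 h
  · exact h2 h

-- one iteration of A's inner keyword loop, on the explicit accumulators: exactly the pvM contributions
theorem pvStepCore (g w t a b : List String) (s : List Char) :
    pvTryA (pvDictOf g w t a b) s (PySem.Chars.lower s)
        ["given", "when", "then", "and", "but"] =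
      pvDictOf (g ++ pvM "given" s) (w ++ pvM "when" s) (t ++ pvM "then" s)
               (a ++ pvM "and" s) (b ++ pvM "but" s) := by
  have dis : ∀ p q : List Char, ¬ p <+: q → ¬ q <+: p →
      PySem.Chars.startswith (PySem.Chars.lower s) p = true →
      PySem.Chars.startswith (PySem.Chars.lower s) q = false :=
    fun p q h1 h2 hp => pvDisj (PySem.Chars.lower s) p q h1 h2 hp
  by_cases h1 : PySem.Chars.startswith (PySem.Chars.lower s) ("given".toList ++ [' ']) = true
  · have hW := dis ("given".toList ++ [' ']) ("when".toList ++ [' ']) (by decide) (by decide) h1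
    have hT := dis ("given".toList ++ [' ']) ("then".toList ++ [' ']) (by decide) (by decide) h1
    have hA := dis ("given".toList ++ [' ']) ("and".toList ++ [' ']) (by decide) (by decide) h1
    have hB := dis ("given".toList ++ [' ']) ("but".toList ++ [' ']) (by decide) (by decide) h1
    simp only [pvTryA, pvM, h1, hW, hT, hA, hB, if_true, Bool.false_eq_true, if_false,
      List.append_nil]
    rfl
  · rw [Bool.not_eq_true] at h1
    by_cases h2 : PySem.Chars.startswith (PySem.Chars.lower s) ("when".toList ++ [' ']) = true
    · have hT := dis ("when".toList ++ [' ']) ("then".toList ++ [' ']) (by decide) (by decide) h2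
      have hA := dis ("when".toList ++ [' ']) ("and".toList ++ [' ']) (by decide) (by decide) h2
      have hB := dis ("when".toList ++ [' ']) ("but".toList ++ [' ']) (by decide) (by decide) h2
      simp only [pvTryA, pvM, h1, h2, hT, hA, hB, if_true, Bool.false_eq_true, if_false,
        List.append_nil]
      rfl
    · rw [Bool.not_eq_true] at h2
      by_cases h3 : PySem.Chars.startswith (PySem.Chars.lower s) ("then".toList ++ [' ']) = true
      · have hA := dis ("then".toList ++ [' ']) ("and".toList ++ [' ']) (by decide) (by decide) h3
        have hB := dis ("then".toList ++ [' ']) ("but".toList ++ [' ']) (by decide) (by decide) h3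
        simp only [pvTryA, pvM, h1, h2, h3, hA, hB, if_true, Bool.false_eq_true, if_false,
          List.append_nil]
        rfl
      · rw [Bool.not_eq_true] at h3
        by_cases h4 : PySem.Chars.startswith (PySem.Chars.lower s) ("and".toList ++ [' ']) = true
        · have hB := dis ("and".toList ++ [' ']) ("but".toList ++ [' ']) (by decide) (by decide) h4
          simp only [pvTryA, pvM, h1, h2, h3, h4, hB, if_true, Bool.false_eq_true, if_false,
            List.append_nil]
          rfl
        · rw [Bool.not_eq_true] at h4
          by_cases h5 : PySem.Chars.startswith (PySem.Chars.lower s) ("but".toList ++ [' ']) = true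
          · simp only [pvTryA, pvM, h1, h2, h3, h4, h5, if_true, Bool.false_eq_true, if_false,
              List.append_nil]
            rfl
          · rw [Bool.not_eq_true] at h5
            simp only [pvTryA, pvM, h1, h2, h3, h4, h5, Bool.false_eq_true, if_false,
              List.append_nil]

-- one iteration of A's outer loop is pvStepCore at the stripped line
theorem pvStepA_eq (g w t a b : List String) (raw : List Char) :
    pvStepA (pvDictOf g w t a b) raw =
      pvDictOf (g ++ pvM "given" (PySem.Chars.strip raw))
               (w ++ pvM "when" (PySem.Chars.strip raw))
               (t ++ pvM "then" (PySem.Chars.strip raw))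
               (a ++ pvM "and" (PySem.Chars.strip raw))
               (b ++ pvM "but" (PySem.Chars.strip raw)) :=
  pvStepCore g w t a b (PySem.Chars.strip raw)

-- A's whole fold, with explicit accumulators: each slot collects its pvM contributions in order
theorem pvFoldA (ls : List (List Char)) (g w t a b : List String) :
    ls.foldl pvStepA (pvDictOf g w t a b) =
      pvDictOf (g ++ ls.flatMap (fun r => pvM "given" (PySem.Chars.strip r)))
               (w ++ ls.flatMap (fun r => pvM "when" (PySem.Chars.strip r)))
               (t ++ ls.flatMap (fun r => pvM "then" (PySem.Chars.strip r)))
               (a ++ ls.flatMap (fun r => pvM "and" (PySem.Chars.strip r)))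
               (b ++ ls.flatMap (fun r => pvM "but" (PySem.Chars.strip r))) := by
  induction ls generalizing g w t a b with
  | nil => simp
  | cons r tl ih =>
    simp only [List.foldl_cons, pvStepA_eq, ih, List.flatMap_cons, List.append_assoc]

-- B's filter-then-map pass over the stripped lines is the concatenation of the pvM contributions
theorem pvMatchesB_eq (kw : String) (ls : List (List Char)) :
    pvMatchesB kw (ls.map PySem.Chars.strip) =
      ls.flatMap (fun r => pvM kw (PySem.Chars.strip r)) := by
  induction ls with
  | nil => rfl
  | cons r tl ih =>
    have hcons : pvMatchesB kw (PySem.Chars.strip r :: tl.map PySem.Chars.strip) =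
        pvM kw (PySem.Chars.strip r) ++ pvMatchesB kw (tl.map PySem.Chars.strip) := by
      unfold pvMatchesB pvM
      simp only [List.filter_cons]
      split_ifs with h
      · simp
      · simp
    simp only [List.map_cons, List.flatMap_cons, hcons, ih]

-- ===== VERDICT (by name: the statement is the Claim_ definition above) =====
theorem interpret_gherkin_spec : Claim_equal_interpret_gherkin := by
  intro text _
  unfold Spec_interpret_gherkin interpret_gherkin interpret_gherkin_alt
  have h0 : pvComponents0 = pvDictOf [] [] [] [] [] := rfl
  rw [h0, pvFoldA]
  simp only [List.nil_append, List.map_cons, List.map_nil, pvMatchesB_eq]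
  rfl
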